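-- pv_equiv track=rewrite | github.com/aszkiel71/uwr | [2024] First Session/WDI/wdi_eigth_list/task5.py | znajdz_minimum
-- ===== SOURCE A (Python) =====
-- def znajdz_minimum(tablica, lewy, prawy):
--
--     if lewy == prawy:
--         return tablica[lewy]
--
--     srodek = (lewy + prawy) // 2
--
--
--     lewy_min = znajdz_minimum(tablica, lewy, srodek)
--     prawy_min = znajdz_minimum(tablica, srodek + 1, prawy)
--
--
--     if lewy_min < prawy_min:
--         return lewy_min
--     else:
--         return prawy_min
-- ===== SOURCE B (Python) =====
-- def znajdz_minimum(tablica, lewy, prawy):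
--     m = tablica[lewy]
--     for i in range(lewy + 1, prawy + 1):
--         if tablica[i] < m:
--             m = tablica[i]
--     return m
-- ===== Notes on version B (the rewrite author's own statement) =====
-- stated objective: simpler
-- what changed: Replaces the recursive divide-and-conquer with a single flat loop that keeps a running minimum over the segment.
import Mathlib
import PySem

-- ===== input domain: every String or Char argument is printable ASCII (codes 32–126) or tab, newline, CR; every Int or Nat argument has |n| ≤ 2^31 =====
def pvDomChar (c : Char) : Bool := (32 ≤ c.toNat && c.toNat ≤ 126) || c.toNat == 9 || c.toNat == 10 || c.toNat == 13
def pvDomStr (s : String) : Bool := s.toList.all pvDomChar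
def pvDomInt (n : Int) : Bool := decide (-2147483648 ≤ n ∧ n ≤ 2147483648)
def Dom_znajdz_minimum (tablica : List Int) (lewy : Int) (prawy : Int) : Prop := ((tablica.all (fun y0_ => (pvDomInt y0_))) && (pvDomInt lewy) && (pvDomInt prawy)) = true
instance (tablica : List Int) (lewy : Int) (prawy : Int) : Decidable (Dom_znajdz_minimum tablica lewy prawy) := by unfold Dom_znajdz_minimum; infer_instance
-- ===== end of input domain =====

-- B replaces A's recursive divide-and-conquer minimum with a single flat loop keeping a running minimum (simpler).


-- midpoint bounds, cited by the port's decreasing_by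
theorem pv_mid_bounds (l r : Int) (h : l < r) :
    l ≤ PySem.Int.floordiv (l + r) 2 ∧ PySem.Int.floordiv (l + r) 2 < r := by
  rw [PySem.Int.floordiv_eq_ediv_of_pos (by omega)]
  omega

-- ===== PORT A =====
-- literal port of A's divide-and-conquer recursion; the 'else 0' branch is only a
-- totality guard for lewy > prawy, where the Python recursion does not terminate
-- (outside Pre_); tablica[lewy] is PySem.List.pyGet? (IndexError = none, outside Pre_).
def znajdz_minimum (tablica : List Int) (lewy : Int) (prawy : Int) : Int :=
  if lewy = prawy then (PySem.List.pyGet? tablica lewy).getD 0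
  else if h : lewy < prawy then
    let srodek := PySem.Int.floordiv (lewy + prawy) 2
    let lewy_min := znajdz_minimum tablica lewy srodek
    let prawy_min := znajdz_minimum tablica (srodek + 1) prawy
    if lewy_min < prawy_min then lewy_min else prawy_min
  else 0
termination_by (prawy - lewy).toNat
decreasing_by
  · have := pv_mid_bounds lewy prawy h
    omega
  · have := pv_mid_bounds lewy prawy h
    omega

-- ===== PORT B =====
-- literal port of Source B: seed with tablica[lewy], one pass over range(lewy+1, prawy+1).
def znajdz_minimum_alt (tablica : List Int) (lewy : Int) (prawy : Int) : Int :=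
  (PySem.List.pyRange (lewy + 1) (prawy + 1) 1).foldl
    (fun m i => let v := (PySem.List.pyGet? tablica i).getD 0; if v < m then v else m)
    ((PySem.List.pyGet? tablica lewy).getD 0)

-- ===== PRECONDITION & SPEC =====
-- Pre_ excludes exactly the inputs where Python A raises: lewy > prawy (unbounded
-- recursion, RecursionError) and segments reaching an index outside [-len, len)
-- (IndexError); Python negative indices are valid and kept inside Pre_.
def Pre_znajdz_minimum (tablica : List Int) (lewy : Int) (prawy : Int) : Prop :=
  -(tablica.length : Int) ≤ lewy ∧ lewy ≤ prawy ∧ prawy < (tablica.length : Int)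
instance (tablica : List Int) (lewy : Int) (prawy : Int) : Decidable (Pre_znajdz_minimum tablica lewy prawy) := by unfold Pre_znajdz_minimum; infer_instance
def pvWitness_znajdz_minimum : List Int × Int × Int := ([3, 1, 2], 0, 2)

def Spec_znajdz_minimum (tablica : List Int) (lewy : Int) (prawy : Int) (out : Int) : Prop := out = znajdz_minimum_alt tablica lewy prawy
instance (tablica : List Int) (lewy : Int) (prawy : Int) (out : Int) : Decidable (Spec_znajdz_minimum tablica lewy prawy out) := by unfold Spec_znajdz_minimum; infer_instance

-- ===== CLAIM (what is proved, stated in full; the proofs are below) =====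
def Claim_equal_znajdz_minimum : Prop := ∀ (tablica : List Int) (lewy : Int) (prawy : Int), Dom_znajdz_minimum tablica lewy prawy → Pre_znajdz_minimum tablica lewy prawy → Spec_znajdz_minimum tablica lewy prawy (znajdz_minimum tablica lewy prawy)

-- ===== LEMMAS AND PROOFS =====

-- B's loop step equals min with the running accumulator.
theorem pv_step_eq_min (t : List Int) (m i : Int) :
    (let v := (PySem.List.pyGet? t i).getD 0; if v < m then v else m)
      = min m ((PySem.List.pyGet? t i).getD 0) := by
  simp only [min_def]
  split_ifs <;> omega

-- pulling a min out of the fold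
theorem pv_foldl_min_init (t : List Int) (L : List Int) (x y : Int) :
    L.foldl (fun m i => min m ((PySem.List.pyGet? t i).getD 0)) (min x y)
      = min x (L.foldl (fun m i => min m ((PySem.List.pyGet? t i).getD 0)) y) := by
  induction L generalizing y with
  | nil => simp
  | cons a L ih => simp only [List.foldl_cons, min_assoc, ih]

theorem pv_alt_eq_foldl_min (t : List Int) (l r : Int) :
    znajdz_minimum_alt t l r
      = (PySem.List.pyRange (l + 1) (r + 1) 1).foldl
          (fun m i => min m ((PySem.List.pyGet? t i).getD 0))
          ((PySem.List.pyGet? t l).getD 0) := by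
  unfold znajdz_minimum_alt
  congr 1
  funext m i
  exact pv_step_eq_min t m i

theorem pv_A_eq_alt (t : List Int) (l r : Int) (h : l ≤ r) :
    znajdz_minimum t l r = znajdz_minimum_alt t l r := by
  rw [pv_alt_eq_foldl_min]
  induction hn : (r - l).toNat using Nat.strong_induction_on generalizing l r with
  | _ n ih =>
  by_cases heq : l = r
  · subst heq
    rw [znajdz_minimum, if_pos rfl, PySem.List.pyRange_one_eq_nil (by omega)]
    simp
  · have hlt : l < r := lt_of_le_of_ne h heq
    obtain ⟨hm1, hm2⟩ := pv_mid_bounds l r hlt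
    rw [znajdz_minimum, if_neg heq, dif_pos hlt]
    set m := PySem.Int.floordiv (l + r) 2 with hmdef
    have hL := ih ((m - l).toNat) (by omega) l m hm1 rfl
    have hR := ih ((r - (m + 1)).toNat) (by omega) (m + 1) r (by omega) rfl
    rw [PySem.List.pyRange_one_append (l + 1) (m + 1) (r + 1) (by omega) (by omega),
        List.foldl_append, ← hL,
        PySem.List.pyRange_one_cons (by omega : (m + 1) < r + 1),
        List.foldl_cons, pv_foldl_min_init, ← hR]
    simp only [min_def]
    split_ifs <;> omega

-- ===== VERDICT (by name: the statement is the Claim_ definition above) =====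
theorem znajdz_minimum_spec : Claim_equal_znajdz_minimum := by
  intro t l r _ hpre
  exact pv_A_eq_alt t l r hpre.2.1
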